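-- pv_equiv track=rewrite | github.com/zdisanto/v1 | Fall_2019/ISC220/ISC220_FP/inverted_index.py | process_collection
-- ===== SOURCE A (Python) =====
-- def clean_text(doc):
--
--     res = doc
--
--     # remove common punctuation
--     res = res.replace( ',' , '' )
--     res = res.replace( '.' , '' )
--     res = res.replace( '?' , '' )
--     res = res.replace( '!' , '' )
--     res = res.replace( '(' , '' )
--     res = res.replace( ')' , '' )
--     res = res.replace( '\n' , '' )
--     res = res.replace( '\"' , '' )
--     res = res.replace( '\'' , '' )
--     res = res.replace( ';' , '' )
--     res = res.replace( ':' , '' )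
--     #doc = doc.replace( '-' , '' )
--
--     return(res)
--
-- def normalize_text(doc):
--
--     res = doc
--
--     #force lowercase
--     res = res.lower()
--
--     return(res)
--
-- def tokenize_text(doc):
--
--     res = doc
--
--     # split into words by on spaces
--     res = res.split( " " )
--
--     return(res)
--
-- def process_collection(coll):
--     res_coll = []
--
--     for doc in coll:
--
--         res_doc = doc
--
--         res_doc = clean_text(res_doc)
--         res_doc = normalize_text(res_doc)
--         res_doc = tokenize_text(res_doc)
--
--         res_coll.append(res_doc)
--
--     return(res_coll)
-- ===== SOURCE B (Python) =====
-- _REMOVE = set(',.?!()\n"\';:')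
--
-- def process_collection(coll):
--     # one character-filtering pass per doc instead of eleven chained .replace scans
--     return [''.join(ch for ch in doc if ch not in _REMOVE).lower().split(" ")
--             for doc in coll]
-- ===== Notes on version B (the rewrite author's own statement) =====
-- stated objective: simpler
-- what changed: Replaces the eleven chained .replace full-string scans (via three helper functions) with a single character-filter pass against a punctuation set, inlined into one list comprehension with .lower().split(" ").
import Mathlib
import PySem

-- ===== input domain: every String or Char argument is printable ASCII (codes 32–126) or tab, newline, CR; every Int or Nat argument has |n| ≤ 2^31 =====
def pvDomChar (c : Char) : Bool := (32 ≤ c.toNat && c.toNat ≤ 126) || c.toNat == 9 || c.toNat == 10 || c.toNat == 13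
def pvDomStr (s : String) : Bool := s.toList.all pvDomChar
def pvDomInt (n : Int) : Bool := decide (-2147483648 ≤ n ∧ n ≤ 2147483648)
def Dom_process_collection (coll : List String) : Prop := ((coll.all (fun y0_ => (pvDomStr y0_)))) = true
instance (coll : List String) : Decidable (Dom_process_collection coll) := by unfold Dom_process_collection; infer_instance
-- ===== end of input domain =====

-- B inlines A's three helpers and replaces eleven chained .replace scans with one character-filter pass (simpler).


-- ===== PORT A =====
def clean_text (doc : String) : String :=
  let res := doc
  let res := PySem.Str.replace res "," ""
  let res := PySem.Str.replace res "." ""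
  let res := PySem.Str.replace res "?" ""
  let res := PySem.Str.replace res "!" ""
  let res := PySem.Str.replace res "(" ""
  let res := PySem.Str.replace res ")" ""
  let res := PySem.Str.replace res "\n" ""
  let res := PySem.Str.replace res "\"" ""
  let res := PySem.Str.replace res "'" ""
  let res := PySem.Str.replace res ";" ""
  let res := PySem.Str.replace res ":" ""
  res

def normalize_text (doc : String) : String :=
  PySem.Str.lower doc

def tokenize_text (doc : String) : List String :=
  (PySem.Str.split? doc " ").getD []

def process_collection (coll : List String) : List (List String) :=
  coll.foldl (fun res_coll doc =>
    let res_doc := doc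
    let res_doc := clean_text res_doc
    let res_doc := normalize_text res_doc
    let res_doc := tokenize_text res_doc
    res_coll ++ [res_doc]) []

-- ===== PORT B =====
def pvRemoveChars : List Char := [',', '.', '?', '!', '(', ')', '\n', '"', '\'', ';', ':']

def process_collection_alt (coll : List String) : List (List String) :=
  coll.map (fun doc =>
    (PySem.Str.split? (PySem.Str.lower
      (String.ofList (doc.toList.filter (fun ch => !(pvRemoveChars.contains ch))))) " ").getD [])

-- ===== PRECONDITION & SPEC =====
def Spec_process_collection (coll : List String) (out : List (List String)) : Prop := out = process_collection_alt coll
instance (coll : List String) (out : List (List String)) : Decidable (Spec_process_collection coll out) := by unfold Spec_process_collection; infer_instance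

-- ===== CLAIM (what is proved, stated in full; the proofs are below) =====
def Claim_equal_process_collection : Prop := ∀ (coll : List String), Dom_process_collection coll → Spec_process_collection coll (process_collection coll)

-- ===== LEMMAS AND PROOFS =====

-- replace.go with a single-char pattern and empty replacement is a filter
theorem replace_go_single (c : Char) : ∀ (fuel : Nat) (l acc : List Char), l.length ≤ fuel →
    PySem.Chars.replace.go [c] [] fuel l acc = acc.reverse ++ l.filter (fun x => x != c) := by
  intro fuel
  induction fuel with
  | zero => intro l acc h; cases l with
    | nil => simp [PySem.Chars.replace.go]
    | cons a t => simp at h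
  | succ n ih =>
    intro l acc h
    cases l with
    | nil => simp [PySem.Chars.replace.go]
    | cons a t =>
      simp only [PySem.Chars.replace.go]
      by_cases hac : a = c
      · subst hac
        have hp : List.isPrefixOf [a] (a :: t) = true := by simp [List.isPrefixOf]
        rw [if_pos hp]
        simp only [List.length_cons, List.length_nil, Nat.zero_add, List.drop_one,
          List.tail_cons, List.reverse_nil, List.nil_append]
        rw [ih t acc (by simpa using Nat.le_of_succ_le_succ h)]
        simp
      · have hp : List.isPrefixOf [c] (a :: t) = false := by
          simp [List.isPrefixOf]; exact fun h' => hac h'.symm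
        rw [if_neg (by simp [hp])]
        rw [ih t (a :: acc) (by simpa using Nat.le_of_succ_le_succ h)]
        simp [hac]

theorem replace_single (c : Char) (s : List Char) :
    PySem.Chars.replace s [c] [] = s.filter (fun x => x != c) := by
  rw [PySem.Chars.replace]
  simp only [List.isEmpty, reduceCtorEq, if_false]
  exact replace_go_single c s.length s [] le_rfl

theorem str_replace_single (s o : String) (c : Char) (ho : o.toList = [c]) :
    (PySem.Str.replace s o "").toList = s.toList.filter (fun x => x != c) := by
  rw [PySem.Str.toList_replace, ho, show ("" : String).toList = [] by decide, replace_single]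

theorem clean_text_toList (s : String) :
    (clean_text s).toList = s.toList.filter (fun ch => !(pvRemoveChars.contains ch)) := by
  unfold clean_text
  simp only
  rw [str_replace_single _ _ ':' (by decide), str_replace_single _ _ ';' (by decide),
      str_replace_single _ _ '\'' (by decide), str_replace_single _ _ '"' (by decide),
      str_replace_single _ _ '\n' (by decide), str_replace_single _ _ ')' (by decide),
      str_replace_single _ _ '(' (by decide), str_replace_single _ _ '!' (by decide),
      str_replace_single _ _ '?' (by decide), str_replace_single _ _ '.' (by decide),
      str_replace_single _ _ ',' (by decide)]
  simp only [List.filter_filter]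
  apply List.filter_congr
  intro ch _
  simp only [pvRemoveChars, List.contains_cons, List.contains_nil, Bool.or_false, Bool.not_or, bne]
  ac_rfl

theorem clean_text_eq (s : String) :
    clean_text s = String.ofList (s.toList.filter (fun ch => !(pvRemoveChars.contains ch))) := by
  rw [← clean_text_toList, String.ofList_toList]

-- ===== VERDICT (by name: the statement is the Claim_ definition above) =====
theorem process_collection_spec : Claim_equal_process_collection := by
  unfold Claim_equal_process_collection
  intro coll hdom
  clear hdom
  unfold Spec_process_collection process_collection process_collection_alt
  induction coll using List.reverseRecOn with
  | nil => rfl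
  | append_singleton xs x ih =>
    rw [List.foldl_append, List.map_append, ← ih]
    simp only [List.foldl, List.map]
    rw [clean_text_eq]
    rfl
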